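-- pv_equiv track=rewrite | github.com/ihasson/csu-data-munging | code/transitionMatrix.py | merge10Terms
-- ===== SOURCE A (Python) =====
-- def merge10Terms(transmat):
--     mergedTrans = {}
--     for term,termTrans in transmat.items():
--         for start_course,to_courses in termTrans.items():
--             if not(start_course in mergedTrans):
--                 mergedTrans[start_course] = {}
--             for end_course,num in to_courses.items():
--                 if end_course in mergedTrans[start_course]:
--                     mergedTrans[start_course][end_course] += num
--                 else:
--                     mergedTrans[start_course][end_course] = num
--     return mergedTrans
-- ===== SOURCE B (Python) =====
-- # Group the inner dicts by start course first, then recompute each cell as a sum of lookups.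
-- def merge10Terms(transmat):
--     bysrc = {}
--     for termTrans in transmat.values():
--         for s, to_courses in termTrans.items():
--             bysrc.setdefault(s, []).append(to_courses)
--     return {s: {e: sum(d.get(e, 0) for d in ds)
--                 for e in dict.fromkeys(e for d in ds for e in d)}
--             for s, ds in bysrc.items()}
-- ===== Notes on version B (the rewrite author's own statement) =====
-- stated objective: alternative
-- what changed: B never accumulates counts into a mutable nested dict: it first only groups the inner transition dicts by start course (collecting references, no arithmetic), then computes every result cell independently as sum(d.get(e,0) for d in that start's dicts), with the end-course order recovered by dict.fromkeys; A instead folds every entry into an in-place nested dict with running totals.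
import Mathlib
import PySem

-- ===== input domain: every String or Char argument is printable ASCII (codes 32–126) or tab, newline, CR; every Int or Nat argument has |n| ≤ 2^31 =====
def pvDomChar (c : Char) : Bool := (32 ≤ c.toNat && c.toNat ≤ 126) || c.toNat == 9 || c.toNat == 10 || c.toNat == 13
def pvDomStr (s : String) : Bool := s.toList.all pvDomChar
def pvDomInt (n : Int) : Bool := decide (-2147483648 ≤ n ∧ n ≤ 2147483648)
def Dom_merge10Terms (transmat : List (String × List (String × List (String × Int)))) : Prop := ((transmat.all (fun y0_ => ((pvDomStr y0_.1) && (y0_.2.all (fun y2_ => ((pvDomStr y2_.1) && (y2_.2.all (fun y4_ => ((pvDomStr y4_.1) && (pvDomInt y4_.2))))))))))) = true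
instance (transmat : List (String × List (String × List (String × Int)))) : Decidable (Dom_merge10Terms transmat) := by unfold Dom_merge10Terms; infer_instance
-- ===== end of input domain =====

-- B discovers the key skeleton first and then recomputes every cell as a sum of per-term lookups,
-- instead of A's fold of all entries into a mutable nested dict; alternative algorithm, not faster.


-- ===== PORT A =====
def pvA_pair (s : String) (merged : PySem.Dict String (PySem.Dict String Int)) (q : String × Int) : PySem.Dict String (PySem.Dict String Int) :=
  let inner := merged.getD s PySem.Dict.empty
  if inner.contains q.1 then
    merged.insert s (inner.insert q.1 (inner.getD q.1 0 + q.2))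
  else
    merged.insert s (inner.insert q.1 q.2)

def pvA_entry (merged : PySem.Dict String (PySem.Dict String Int)) (p : String × List (String × Int)) : PySem.Dict String (PySem.Dict String Int) :=
  let merged := if merged.contains p.1 then merged else merged.insert p.1 PySem.Dict.empty
  p.2.foldl (pvA_pair p.1) merged

def merge10Terms (transmat : List (String × List (String × List (String × Int)))) : List (String × List (String × Int)) :=
  let merged := transmat.foldl (fun m t => t.2.foldl pvA_entry m) PySem.Dict.empty
  merged.items.map (fun p => (p.1, p.2.items))

-- ===== PORT B =====
-- Phase 1: group the inner transition dicts by start course (bysrc.setdefault(s, []).append(d)).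
def pvB_group (g : PySem.Dict String (List (List (String × Int)))) (p : String × List (String × Int)) : PySem.Dict String (List (List (String × Int))) :=
  g.modify p.1 [] (· ++ [p.2])

-- Phase 2: one cell = sum(d.get(e, 0) for d in ds).
def pvB_cell (ds : List (List (String × Int))) (e : String) : Int :=
  (ds.map (fun d => (PySem.Dict.mk d).getD e 0)).sum

def merge10Terms_alt (transmat : List (String × List (String × List (String × Int)))) : List (String × List (String × Int)) :=
  let bysrc := transmat.foldl (fun g t => t.2.foldl pvB_group g) PySem.Dict.empty
  bysrc.items.map (fun p =>
    (p.1, (PySem.List.dedup ((p.2.map (fun d => d.map Prod.fst)).flatten)).map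
      (fun e => (e, pvB_cell p.2 e))))

-- ===== PRECONDITION & SPEC =====
-- Pre_ only requires distinct keys inside each innermost dict: the Python argument is a dict of
-- dicts of dicts, so association lists with duplicate keys encode no Python input at all (A returns
-- on every genuine dict, and every genuine dict satisfies Pre_).
def Pre_merge10Terms (transmat : List (String × List (String × List (String × Int)))) : Prop :=
  ∀ t ∈ transmat, ∀ p ∈ t.2, (p.2.map Prod.fst).Nodup
instance (transmat : List (String × List (String × List (String × Int)))) : Decidable (Pre_merge10Terms transmat) := by unfold Pre_merge10Terms; infer_instance

def pvWitness_merge10Terms : (List (String × List (String × List (String × Int)))) :=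
  [("t1", [("a", [("x", 2), ("y", 3)])]), ("t2", [("a", [("x", 5)]), ("b", [("y", 1)])])]

def Spec_merge10Terms (transmat : List (String × List (String × List (String × Int)))) (out : List (String × List (String × Int))) : Prop := out = merge10Terms_alt transmat
instance (transmat : List (String × List (String × List (String × Int)))) (out : List (String × List (String × Int))) : Decidable (Spec_merge10Terms transmat out) := by unfold Spec_merge10Terms; infer_instance

-- ===== CLAIM (what is proved, stated in full; the proofs are below) =====
def Claim_equal_merge10Terms : Prop := ∀ (transmat : List (String × List (String × List (String × Int)))), Dom_merge10Terms transmat → Pre_merge10Terms transmat → Spec_merge10Terms transmat (merge10Terms transmat)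

-- ===== LEMMAS AND PROOFS =====

-- GHOST state (proof only): the flat (start, end) ↦ running-total table of the processed entries,
-- plus the set of starts seen so far; both sides are related to it.
def pvG_pair (s : String) (st : PySem.Dict String Unit × PySem.Dict (String × String) Int) (q : String × Int) : PySem.Dict String Unit × PySem.Dict (String × String) Int :=
  (st.1, st.2.insert (s, q.1) (st.2.getD (s, q.1) 0 + q.2))

def pvG_entry (st : PySem.Dict String Unit × PySem.Dict (String × String) Int) (p : String × List (String × Int)) : PySem.Dict String Unit × PySem.Dict (String × String) Int :=
  p.2.foldl (pvG_pair p.1) (st.1.setdefault p.1 (), st.2)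

-- inner dict extracted from the flat items for a given start
def pvInnerOf (s : String) (items : List ((String × String) × Int)) : PySem.Dict String Int :=
  PySem.Dict.mk ((items.filter (fun kv => kv.1.1 == s)).map (fun kv => (kv.1.2, kv.2)))

lemma pvInner_contains (s e : String) (items : List ((String × String) × Int)) :
    (pvInnerOf s items).contains e = true ↔ (s, e) ∈ items.map (·.1) := by
  rw [PySem.Dict.contains_eq_decide_mem_keys]
  simp only [pvInnerOf, PySem.Dict.keys, decide_eq_true_eq,
    List.map_map, List.mem_map, List.mem_filter, Function.comp]
  constructor
  · rintro ⟨kv, ⟨hm, hs⟩, he⟩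
    exact ⟨kv, hm, by simp at hs; exact Prod.ext (by simp [hs]) (by simp [he])⟩
  · rintro ⟨kv, hm, hk⟩
    exact ⟨kv, ⟨hm, by simp [hk]⟩, by simp [hk]⟩

lemma pvInner_keys_nodup (s : String) (items : List ((String × String) × Int))
    (h : (items.map (·.1)).Nodup) : (pvInnerOf s items).keys.Nodup := by
  induction items with
  | nil => simp [pvInnerOf, PySem.Dict.keys]
  | cons kv l ih =>
    simp only [List.map_cons, List.nodup_cons] at h
    by_cases hs : kv.1.1 == s
    · simp only [pvInnerOf, PySem.Dict.keys, List.filter_cons, hs,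
        ite_true, List.map_cons, List.nodup_cons]
      refine ⟨?_, ?_⟩
      · intro hmem
        simp only [List.map_map, List.mem_map, List.mem_filter, Function.comp] at hmem
        obtain ⟨kv2, ⟨hm2, hs2⟩, he2⟩ := hmem
        simp only [beq_iff_eq] at hs hs2
        exact h.1 (List.mem_map.mpr ⟨kv2, hm2, Prod.ext (by rw [hs2, hs]) he2⟩)
      · have := ih h.2
        simpa [pvInnerOf, PySem.Dict.keys] using this
    · have hs' : (kv.1.1 == s) = false := by simpa using hs
      simpa [pvInnerOf, PySem.Dict.keys, List.filter_cons, hs'] using ih h.2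

-- updating one flat entry in place updates the extracted inner dict in place
lemma pvInner_list_update_self (s e : String) (v : Int) (items : List ((String × String) × Int)) :
    ((items.map (fun p => if p.1 == (s, e) then ((s, e), v) else p)).filter
        (fun kv => kv.1.1 == s)).map (fun kv => (kv.1.2, kv.2))
      = ((items.filter (fun kv => kv.1.1 == s)).map (fun kv => (kv.1.2, kv.2))).map
          (fun q => if q.1 == e then (e, v) else q) := by
  induction items with
  | nil => simp
  | cons kv l ih =>
    simp only [List.map_cons, List.filter_cons]
    by_cases hk : kv.1 = (s, e)
    · have h1 : (kv.1 == (s, e)) = true := by simp [hk]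
      have h3 : (kv.1.1 == s) = true := by simp [hk]
      have h4 : (kv.1.2 == e) = true := by simp [hk]
      simp only [h1, reduceIte]
      have h2 : (((s, e), v).1.1 == s) = true := by simp
      simp only [h2, h3, reduceIte, List.map_cons, h4]
      exact congrArg _ ih
    · have h1 : (kv.1 == (s, e)) = false := by simpa using hk
      simp only [h1, Bool.false_eq_true, reduceIte]
      by_cases hs : kv.1.1 = s
      · have h3 : (kv.1.1 == s) = true := by simp [hs]
        have h4 : (kv.1.2 == e) = false := by
          simp only [beq_eq_false_iff_ne, ne_eq]
          intro hcc; exact hk (Prod.ext hs hcc)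
        simp only [h3, reduceIte, List.map_cons, h4, Bool.false_eq_true, reduceIte]
        exact congrArg _ ih
      · have h3 : (kv.1.1 == s) = false := by simpa using hs
        simp only [h3, Bool.false_eq_true, reduceIte]
        exact ih

lemma pvInner_map_update_self (s e : String) (v : Int) (items : List ((String × String) × Int)) :
    pvInnerOf s (items.map (fun p => if p.1 == (s, e) then ((s, e), v) else p))
      = PySem.Dict.mk ((pvInnerOf s items).items.map (fun q => if q.1 == e then (e, v) else q)) := by
  apply PySem.Dict.ext
  exact pvInner_list_update_self s e v items

lemma pvInner_map_update_ne (s' s e : String) (v : Int) (items : List ((String × String) × Int))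
    (hne : s' ≠ s) :
    pvInnerOf s' (items.map (fun p => if p.1 == (s, e) then ((s, e), v) else p))
      = pvInnerOf s' items := by
  apply PySem.Dict.ext
  simp only [pvInnerOf]
  induction items with
  | nil => simp
  | cons kv l ih =>
    simp only [List.map_cons, List.filter_cons]
    by_cases hk : kv.1 = (s, e)
    · have h1 : (kv.1 == (s, e)) = true := by simp [hk]
      have h2 : (((s, e), v).1.1 == s') = false := by simpa using (Ne.symm hne)
      have h3 : (kv.1.1 == s') = false := by simp [hk]; exact Ne.symm hne
      simp only [h1, reduceIte, h2, h3, Bool.false_eq_true, reduceIte]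
      exact ih
    · have h1 : (kv.1 == (s, e)) = false := by simpa using hk
      simp only [h1, Bool.false_eq_true, reduceIte]
      by_cases hs : kv.1.1 = s'
      · have h3 : (kv.1.1 == s') = true := by simp [hs]
        simp only [h3, reduceIte, List.map_cons]
        exact congrArg _ ih
      · have h3 : (kv.1.1 == s') = false := by simpa using hs
        simp only [h3, Bool.false_eq_true, reduceIte]
        exact ih

-- appending a fresh flat entry appends to the matching inner dict
lemma pvInner_append (s' s e : String) (v : Int) (items : List ((String × String) × Int)) :
    pvInnerOf s' (items ++ [((s, e), v)])
      = if s = s' then PySem.Dict.mk ((pvInnerOf s' items).items ++ [(e, v)]) else pvInnerOf s' items := by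
  apply PySem.Dict.ext
  by_cases h : s = s'
  · simp [pvInnerOf, h, List.filter_append]
  · have h' : (s == s') = false := by simpa using h
    simp [pvInnerOf, h, h', List.filter_append]

lemma pvInner_getD (s e : String) (flat : PySem.Dict (String × String) Int) (w : Int)
    (hnd : flat.keys.Nodup) (hmem : ((s, e), w) ∈ flat.items) :
    (pvInnerOf s flat.items).getD e 0 = w ∧ flat.getD (s, e) 0 = w := by
  refine ⟨?_, PySem.Dict.getD_of_mem_items flat hmem hnd 0⟩
  have hnd' : (pvInnerOf s flat.items).keys.Nodup := pvInner_keys_nodup s flat.items hnd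
  refine PySem.Dict.getD_of_mem_items _ ?_ hnd' 0
  simp only [pvInnerOf, List.mem_map, List.mem_filter]
  exact ⟨((s, e), w), ⟨hmem, by simp⟩, by simp⟩

-- the invariant linking A's state to the ghost state
def pvInv (merged : PySem.Dict String (PySem.Dict String Int)) (starts : PySem.Dict String Unit)
    (flat : PySem.Dict (String × String) Int) : Prop :=
  merged.keys = starts.keys ∧ starts.keys.Nodup ∧ flat.keys.Nodup ∧
  (∀ kv ∈ flat.items, starts.contains kv.1.1 = true) ∧
  (∀ s, merged.get? s = if starts.contains s then some (pvInnerOf s flat.items) else none)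

lemma pvContains_iff_mem_fst (flat : PySem.Dict (String × String) Int) (k : String × String) :
    flat.contains k = true ↔ k ∈ flat.items.map (·.1) := by
  rw [PySem.Dict.contains_eq_decide_mem_keys]
  simp [PySem.Dict.keys]

lemma pvInv_pair (s : String) (q : String × Int) (merged : PySem.Dict String (PySem.Dict String Int))
    (starts : PySem.Dict String Unit) (flat : PySem.Dict (String × String) Int)
    (hs : starts.contains s = true) (h : pvInv merged starts flat) :
    pvInv (pvA_pair s merged q) starts (pvG_pair s (starts, flat) q).2 := by
  obtain ⟨h1, h0, h2, h3, h4⟩ := h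
  have hget : merged.get? s = some (pvInnerOf s flat.items) := by rw [h4 s, hs]; rfl
  have hgetD : merged.getD s PySem.Dict.empty = pvInnerOf s flat.items :=
    PySem.Dict.getD_of_get?_eq_some merged PySem.Dict.empty hget
  have hcontains : merged.contains s = true := by
    rw [PySem.Dict.contains_eq_isSome_get?, hget]; rfl
  by_cases hc : (pvInnerOf s flat.items).contains (q.1) = true
  · -- the (s, q.1) key already exists: both sides update in place
    have hkey : (s, q.1) ∈ flat.items.map (·.1) := (pvInner_contains s q.1 flat.items).mp hc
    obtain ⟨kv, hkv, hk1⟩ := List.mem_map.mp hkey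
    have hkv' : ((s, q.1), kv.2) ∈ flat.items := by
      have hx : kv = ((s, q.1), kv.2) := Prod.ext hk1 rfl
      exact hx ▸ hkv
    obtain ⟨hiv, hfv⟩ := pvInner_getD s q.1 flat kv.2 h2 hkv'
    have hfc : flat.contains (s, q.1) = true := (pvContains_iff_mem_fst flat _).mpr hkey
    have hAeq : pvA_pair s merged q
        = merged.insert s ((pvInnerOf s flat.items).insert q.1 (kv.2 + q.2)) := by
      simp only [pvA_pair, hgetD, hc, reduceIte, hiv]
    have hBitems : (pvG_pair s (starts, flat) q).2.items
        = flat.items.map (fun p => if p.1 == (s, q.1) then ((s, q.1), kv.2 + q.2) else p) := by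
      simp only [pvG_pair, hfv]
      exact PySem.Dict.items_insert_of_contains flat _ hfc
    refine ⟨?_, h0, ?_, ?_, ?_⟩
    · rw [hAeq, PySem.Dict.keys_insert_of_contains merged _ hcontains]; exact h1
    · exact PySem.Dict.nodup_keys_insert flat _ _ h2
    · intro kv' hkv2
      rw [hBitems] at hkv2
      obtain ⟨p, hp, hpe⟩ := List.mem_map.mp hkv2
      by_cases hpk : (p.1 == (s, q.1)) = true
      · simp only [hpk, reduceIte] at hpe; rw [← hpe]; exact hs
      · simp only [hpk, Bool.false_eq_true, reduceIte] at hpe; rw [← hpe]; exact h3 p hp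
    · intro s'
      rw [hAeq, PySem.Dict.get?_insert]
      by_cases hss : s' = s
      · subst hss
        rw [if_pos rfl, hs, if_pos rfl, hBitems, pvInner_map_update_self]
        have : (pvInnerOf s' flat.items).insert q.1 (kv.2 + q.2)
            = PySem.Dict.mk ((pvInnerOf s' flat.items).items.map
                (fun p => if p.1 == q.1 then (q.1, kv.2 + q.2) else p)) := by
          apply PySem.Dict.ext
          exact PySem.Dict.items_insert_of_contains _ _ hc
        rw [this]
      · rw [if_neg hss, hBitems, pvInner_map_update_ne s' s q.1 (kv.2 + q.2) flat.items hss]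
        exact h4 s'
  · -- fresh (s, q.1) key: both sides append
    have hic : (pvInnerOf s flat.items).contains (q.1) = false := by
      cases hx : (pvInnerOf s flat.items).contains (q.1) with
      | false => rfl
      | true => exact absurd hx hc
    have hkey : (s, q.1) ∉ flat.items.map (·.1) := fun hm =>
      hc ((pvInner_contains s q.1 flat.items).mpr hm)
    have hfc : flat.contains (s, q.1) = false := by
      cases hx : flat.contains (s, q.1) with
      | false => rfl
      | true => exact absurd ((pvContains_iff_mem_fst flat _).mp hx) hkey
    have hfv : flat.getD (s, q.1) 0 = 0 := PySem.Dict.getD_of_not_contains flat 0 hfc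
    have hAeq : pvA_pair s merged q
        = merged.insert s ((pvInnerOf s flat.items).insert q.1 q.2) := by
      simp only [pvA_pair, hgetD, hc, Bool.false_eq_true, reduceIte]
    have hBitems : (pvG_pair s (starts, flat) q).2.items
        = flat.items ++ [((s, q.1), q.2)] := by
      simp only [pvG_pair, hfv, zero_add]
      exact PySem.Dict.items_insert_of_not_contains flat _ hfc
    refine ⟨?_, h0, ?_, ?_, ?_⟩
    · rw [hAeq, PySem.Dict.keys_insert_of_contains merged _ hcontains]; exact h1
    · exact PySem.Dict.nodup_keys_insert flat _ _ h2
    · intro kv' hkv2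
      rw [hBitems] at hkv2
      rcases List.mem_append.mp hkv2 with hold | hnew
      · exact h3 kv' hold
      · simp only [List.mem_singleton] at hnew; rw [hnew]; exact hs
    · intro s'
      rw [hAeq, PySem.Dict.get?_insert, hBitems, pvInner_append s' s q.1 q.2 flat.items]
      by_cases hss : s' = s
      · subst hss
        rw [if_pos rfl, hs, if_pos rfl, if_pos rfl]
        have : (pvInnerOf s' flat.items).insert q.1 q.2
            = PySem.Dict.mk ((pvInnerOf s' flat.items).items ++ [(q.1, q.2)]) := by
          apply PySem.Dict.ext
          exact PySem.Dict.items_insert_of_not_contains _ _ hic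
        rw [this]
      · rw [if_neg hss, if_neg (show ¬ (s = s') from fun hx => hss hx.symm)]
        exact h4 s'

lemma pvG_foldl_fst (s : String) (l : List (String × Int))
    (st : PySem.Dict String Unit × PySem.Dict (String × String) Int) :
    (l.foldl (pvG_pair s) st).1 = st.1 := by
  induction l generalizing st with
  | nil => rfl
  | cons q l ih => rw [List.foldl_cons, ih]; rfl

lemma pvInv_pairs (s : String) (l : List (String × Int))
    (merged : PySem.Dict String (PySem.Dict String Int)) (starts : PySem.Dict String Unit)
    (flat : PySem.Dict (String × String) Int)
    (hs : starts.contains s = true) (h : pvInv merged starts flat) :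
    pvInv (l.foldl (pvA_pair s) merged) starts ((l.foldl (pvG_pair s) (starts, flat)).2) := by
  induction l generalizing merged flat with
  | nil => exact h
  | cons q l ih =>
    rw [List.foldl_cons, List.foldl_cons]
    have hfst : pvG_pair s (starts, flat) q = (starts, (pvG_pair s (starts, flat) q).2) := rfl
    rw [hfst]
    exact ih (pvA_pair s merged q) _ (pvInv_pair s q merged starts flat hs h)

lemma pvInv_entry (p : String × List (String × Int))
    (merged : PySem.Dict String (PySem.Dict String Int)) (starts : PySem.Dict String Unit)
    (flat : PySem.Dict (String × String) Int) (h : pvInv merged starts flat) :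
    pvInv (pvA_entry merged p) ((pvG_entry (starts, flat) p).1) ((pvG_entry (starts, flat) p).2) := by
  obtain ⟨h1, h0, h2, h3, h4⟩ := h
  have hBe : pvG_entry (starts, flat) p
      = p.2.foldl (pvG_pair p.1) (starts.setdefault p.1 (), flat) := rfl
  rw [hBe, pvG_foldl_fst]
  by_cases hc : starts.contains p.1 = true
  · have hsd : starts.setdefault p.1 () = starts := PySem.Dict.setdefault_of_contains starts () hc
    have hmc : merged.contains p.1 = true := by
      rw [PySem.Dict.contains_eq_isSome_get?, h4 p.1, hc]; rfl
    have hAe : pvA_entry merged p = p.2.foldl (pvA_pair p.1) merged := by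
      simp only [pvA_entry, hmc, reduceIte]
    rw [hAe, hsd]
    exact pvInv_pairs p.1 p.2 merged starts flat hc ⟨h1, h0, h2, h3, h4⟩
  · have hc' : starts.contains p.1 = false := by
      cases hx : starts.contains p.1 with
      | false => rfl
      | true => exact absurd hx hc
    have hsd : starts.setdefault p.1 () = starts.insert p.1 () :=
      PySem.Dict.setdefault_of_not_contains starts () hc'
    have hmc : merged.contains p.1 = false := by
      rw [PySem.Dict.contains_eq_isSome_get?, h4 p.1, hc']; rfl
    have hAe : pvA_entry merged p = p.2.foldl (pvA_pair p.1) (merged.insert p.1 PySem.Dict.empty) := by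
      simp only [pvA_entry, hmc, Bool.false_eq_true, reduceIte]
    rw [hAe, hsd]
    have hinner_nil : pvInnerOf p.1 flat.items = PySem.Dict.empty := by
      apply PySem.Dict.ext
      simp only [pvInnerOf]
      have : flat.items.filter (fun kv => kv.1.1 == p.1) = [] := by
        rw [List.filter_eq_nil_iff]
        intro kv hkv hbe
        simp only [beq_iff_eq] at hbe
        rw [← hbe] at hc'
        rw [h3 kv hkv] at hc'
        exact Bool.true_eq_false.mp hc'
      rw [this]; rfl
    have hinv' : pvInv (merged.insert p.1 PySem.Dict.empty) (starts.insert p.1 ()) flat := by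
      refine ⟨?_, ?_, h2, ?_, ?_⟩
      · rw [PySem.Dict.keys_insert_of_not_contains merged _ hmc,
          PySem.Dict.keys_insert_of_not_contains starts _ hc', h1]
      · exact PySem.Dict.nodup_keys_insert starts _ _ h0
      · intro kv hkv
        rw [PySem.Dict.contains_insert]
        rw [h3 kv hkv]
        simp
      · intro s'
        rw [PySem.Dict.get?_insert, PySem.Dict.contains_insert]
        by_cases hss : s' = p.1
        · subst hss
          simp only [beq_self_eq_true, Bool.true_or, reduceIte, hinner_nil]
        · have : (s' == p.1) = false := by simpa using hss
          simp only [if_neg hss, this, Bool.false_or]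
          exact h4 s'
    exact pvInv_pairs p.1 p.2 _ _ flat (PySem.Dict.contains_insert_self starts p.1 ()) hinv'

lemma pvInv_entries (l : List (String × List (String × Int)))
    (merged : PySem.Dict String (PySem.Dict String Int))
    (st : PySem.Dict String Unit × PySem.Dict (String × String) Int)
    (h : pvInv merged st.1 st.2) :
    pvInv (l.foldl pvA_entry merged) ((l.foldl pvG_entry st).1) ((l.foldl pvG_entry st).2) := by
  induction l generalizing merged st with
  | nil => exact h
  | cons p l ih =>
    rw [List.foldl_cons, List.foldl_cons]
    have hst : st = (st.1, st.2) := by rfl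
    have h' := pvInv_entry p merged st.1 st.2 h
    have : pvG_entry st p = ((pvG_entry (st.1, st.2) p).1, (pvG_entry (st.1, st.2) p).2) := by
      rw [← hst]
    rw [this]
    exact ih _ _ h'

lemma pvInv_init : pvInv PySem.Dict.empty PySem.Dict.empty PySem.Dict.empty := by
  refine ⟨rfl, ?_, ?_, ?_, ?_⟩
  · simp [PySem.Dict.keys_empty]
  · simp [PySem.Dict.keys_empty]
  · intro kv hkv; simp [PySem.Dict.empty] at hkv
  · intro s
    rw [PySem.Dict.get?_empty, PySem.Dict.contains_empty]
    simp

-- ---- the cell values: ghost flat totals vs B's sum of lookups ----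

def pvPairsSum (e : String) (l : List (String × Int)) : Int :=
  ((l.filter (fun q => q.1 == e)).map (·.2)).sum

def pvEntryCell (s e : String) (p : String × List (String × Int)) : Int :=
  if p.1 = s then pvPairsSum e p.2 else 0

-- the (start, end) key pairs an entry contributes, in order
def pvEntryPairs (p : String × List (String × Int)) : List (String × String) :=
  p.2.map (fun q => (p.1, q.1))

lemma pvG_flat_pairs (s' s e : String) (l : List (String × Int))
    (st : PySem.Dict String Unit × PySem.Dict (String × String) Int) :
    ((l.foldl (pvG_pair s') st).2).getD (s, e) 0
      = st.2.getD (s, e) 0 + (if s' = s then pvPairsSum e l else 0) := by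
  induction l generalizing st with
  | nil => simp [pvPairsSum]
  | cons q l ih =>
    rw [List.foldl_cons, ih]
    simp only [pvG_pair, PySem.Dict.getD_insert]
    by_cases hss : s' = s
    · subst hss
      by_cases he : q.1 = e
      · subst he
        rw [if_pos rfl, if_pos rfl, if_pos rfl]
        simp only [pvPairsSum, List.filter_cons, beq_self_eq_true, reduceIte, List.map_cons,
          List.sum_cons]
        ring
      · have hne' : ¬ ((s', e) = (s', q.1)) := by
          intro hx
          exact he ((Prod.mk.injEq _ _ _ _ |>.mp hx).2.symm)
        rw [if_neg hne', if_pos rfl, if_pos rfl]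
        have he' : (q.1 == e) = false := by
          simp only [beq_eq_false_iff_ne, ne_eq]
          exact fun hx => he hx
        simp only [pvPairsSum, List.filter_cons, he', Bool.false_eq_true, reduceIte]
    · have hne : ¬ ((s, e) = (s', q.1)) := by
        intro hx
        exact hss ((Prod.mk.injEq _ _ _ _ |>.mp hx).1.symm)
      rw [if_neg hne, if_neg hss, if_neg hss]

lemma pvG_flat_entries (s e : String) (l : List (String × List (String × Int)))
    (st : PySem.Dict String Unit × PySem.Dict (String × String) Int) :
    ((l.foldl pvG_entry st).2).getD (s, e) 0
      = st.2.getD (s, e) 0 + (l.map (pvEntryCell s e)).sum := by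
  induction l generalizing st with
  | nil => simp
  | cons p l ih =>
    rw [List.foldl_cons, ih]
    have hstep : ((pvG_entry st p).2).getD (s, e) 0
        = st.2.getD (s, e) 0 + pvEntryCell s e p := by
      show ((p.2.foldl (pvG_pair p.1) (st.1.setdefault p.1 (), st.2)).2).getD (s, e) 0 = _
      rw [pvG_flat_pairs p.1 s e p.2 (st.1.setdefault p.1 (), st.2)]
      rfl
    rw [hstep, List.map_cons, List.sum_cons]
    ring

lemma pvPairsSum_zero_of_not_mem (e : String) (l : List (String × Int))
    (h : e ∉ l.map Prod.fst) : pvPairsSum e l = 0 := by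
  have : l.filter (fun q => q.1 == e) = [] := by
    rw [List.filter_eq_nil_iff]
    intro q hq hbe
    simp only [beq_iff_eq] at hbe
    exact h (List.mem_map.mpr ⟨q, hq, hbe⟩)
  simp [pvPairsSum, this]

lemma pvLookup_inner (e : String) (l : List (String × Int))
    (hnd : (l.map Prod.fst).Nodup) :
    (PySem.Dict.mk l).getD e 0 = pvPairsSum e l := by
  induction l with
  | nil => rfl
  | cons q l ih =>
    simp only [List.map_cons, List.nodup_cons] at hnd
    rw [PySem.Dict.getD_eq_get?_getD, PySem.Dict.get?_mk_cons]
    by_cases hq : q.1 = e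
    · have hq' : (q.1 == e) = true := by simp [hq]
      rw [hq']
      simp only [reduceIte, Option.getD_some]
      have h0 : pvPairsSum e l = 0 :=
        pvPairsSum_zero_of_not_mem e l (by rw [← hq]; exact hnd.1)
      simp only [pvPairsSum, List.filter_cons, hq', reduceIte, List.map_cons, List.sum_cons]
      simp only [pvPairsSum] at h0
      omega
    · have hq' : (q.1 == e) = false := by simpa using hq
      rw [hq']
      simp only [Bool.false_eq_true, reduceIte]
      rw [← PySem.Dict.getD_eq_get?_getD, ih hnd.2]
      simp [pvPairsSum, hq']

-- summing over the entries whose start is s = summing the per-entry cells over all entries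
lemma pvFilter_sum (s e : String) (l : List (String × List (String × Int))) :
    (((l.filter (fun p => p.1 == s)).map (·.2)).map (fun d => pvPairsSum e d)).sum
      = (l.map (pvEntryCell s e)).sum := by
  induction l with
  | nil => rfl
  | cons p l ih =>
    rw [List.filter_cons]
    by_cases hp : p.1 = s
    · have hp' : (p.1 == s) = true := by simp [hp]
      simp only [hp', reduceIte, List.map_cons, List.sum_cons, ih]
      have he : pvEntryCell s e p = pvPairsSum e p.2 := by simp [pvEntryCell, hp]
      rw [he]
    · have hp' : (p.1 == s) = false := by simpa using hp
      simp only [hp', Bool.false_eq_true, reduceIte, List.map_cons, List.sum_cons, ih]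
      have he : pvEntryCell s e p = 0 := by simp [pvEntryCell, hp]
      rw [he, zero_add]

-- B's cell value = the ghost flat table's total at (s, e)
lemma pvCell_eq_flat (l : List (String × List (String × Int))) (s e : String)
    (hin : ∀ p ∈ l, (p.2.map Prod.fst).Nodup) :
    pvB_cell ((l.filter (fun p => p.1 == s)).map (·.2)) e
      = ((l.foldl pvG_entry (PySem.Dict.empty, PySem.Dict.empty)).2).getD (s, e) 0 := by
  rw [pvG_flat_entries s e l (PySem.Dict.empty, PySem.Dict.empty)]
  have h0 : (PySem.Dict.empty : PySem.Dict (String × String) Int).getD (s, e) 0 = 0 :=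
    PySem.Dict.getD_of_not_contains _ 0 (PySem.Dict.contains_empty _)
  rw [h0, zero_add, pvB_cell, ← pvFilter_sum s e l]
  refine congrArg List.sum ?_
  apply List.map_congr_left
  intro d hd
  obtain ⟨p, hp, hpe⟩ := List.mem_map.mp hd
  exact hpe ▸ pvLookup_inner e p.2 (hin p (List.mem_filter.mp hp).1)

-- the flat getD agrees with the extracted inner dict's getD for EVERY key (absent keys give 0 on both sides)
lemma pvInner_getD_flat (s e : String) (flat : PySem.Dict (String × String) Int)
    (hnd : flat.keys.Nodup) :
    (pvInnerOf s flat.items).getD e 0 = flat.getD (s, e) 0 := by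
  by_cases hc : flat.contains (s, e) = true
  · obtain ⟨kv, hkv, hk1⟩ := List.mem_map.mp ((pvContains_iff_mem_fst flat _).mp hc)
    have hkv' : ((s, e), kv.2) ∈ flat.items := by
      have hx : kv = ((s, e), kv.2) := Prod.ext hk1 rfl
      exact hx ▸ hkv
    obtain ⟨h1, h2⟩ := pvInner_getD s e flat kv.2 hnd hkv'
    rw [h1, h2]
  · have hc' : flat.contains (s, e) = false := by
      cases hx : flat.contains (s, e) with
      | false => rfl
      | true => exact absurd hx hc
    have hic : (pvInnerOf s flat.items).contains e = false := by
      cases hx : (pvInnerOf s flat.items).contains e with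
      | false => rfl
      | true =>
        exact absurd ((pvContains_iff_mem_fst flat _).mpr ((pvInner_contains s e flat.items).mp hx)) (by simp [hc'])
    rw [PySem.Dict.getD_of_not_contains _ 0 hic, PySem.Dict.getD_of_not_contains _ 0 hc']

-- ---- the key skeleton: bysrc's keys and grouped lists vs the ghost state ----

-- the grouped dict's per-start list of inner dicts
lemma pvGroup_getD (l : List (String × List (String × Int)))
    (g : PySem.Dict String (List (List (String × Int)))) (s : String) :
    (l.foldl pvB_group g).getD s [] = g.getD s [] ++ (l.filter (fun p => p.1 == s)).map (·.2) := by
  have h : pvB_group = fun (d : PySem.Dict String (List (List (String × Int)))) p => d.modify p.1 [] (· ++ [p.2]) := rfl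
  rw [h]
  exact PySem.Dict.getD_foldl_modify_append l g s

-- the ghost starts dict is just the setdefault fold over the entries
lemma pvG_fold_fst (l : List (String × List (String × Int)))
    (st : PySem.Dict String Unit × PySem.Dict (String × String) Int) :
    (l.foldl pvG_entry st).1 = l.foldl (fun d p => d.setdefault p.1 ()) st.1 := by
  induction l generalizing st with
  | nil => rfl
  | cons p l ih =>
    rw [List.foldl_cons, List.foldl_cons, ih]
    have : (pvG_entry st p).1 = st.1.setdefault p.1 () := pvG_foldl_fst p.1 p.2 _
    rw [this]

-- bysrc and the ghost starts dict always have the same key list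
lemma pvGroup_keys (l : List (String × List (String × Int)))
    (g : PySem.Dict String (List (List (String × Int)))) (d : PySem.Dict String Unit)
    (h : g.keys = d.keys) :
    (l.foldl pvB_group g).keys = (l.foldl (fun d p => d.setdefault p.1 ()) d).keys := by
  induction l generalizing g d with
  | nil => exact h
  | cons p l ih =>
    rw [List.foldl_cons, List.foldl_cons]
    refine ih _ _ ?_
    have hcc : g.contains p.1 = d.contains p.1 := by
      rw [PySem.Dict.contains_eq_decide_mem_keys, PySem.Dict.contains_eq_decide_mem_keys, h]
    show (g.modify p.1 [] (· ++ [p.2])).keys = _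
    rw [PySem.Dict.keys_modify, PySem.Dict.keys_setdefault]
    by_cases hc : d.contains p.1 = true
    · have hgc : g.contains p.1 = true := by rw [hcc]; exact hc
      rw [if_pos hc, PySem.Dict.keys_insert_of_contains g _ hgc, h]
    · have hc' : d.contains p.1 = false := by
        cases hx : d.contains p.1 with
        | false => rfl
        | true => exact absurd hx hc
      have hgc : g.contains p.1 = false := by rw [hcc]; exact hc'
      rw [if_neg hc, PySem.Dict.keys_insert_of_not_contains g _ hgc, h]

-- the ghost flat table's key list is the ordered dedup of all (start, end) pairs
lemma pvG_snd_pairs (s : String) (l : List (String × Int))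
    (st : PySem.Dict String Unit × PySem.Dict (String × String) Int) :
    (l.foldl (pvG_pair s) st).2
      = l.foldl (fun flat q => flat.insert (s, q.1) (flat.getD (s, q.1) 0 + q.2)) st.2 := by
  induction l generalizing st with
  | nil => rfl
  | cons q l ih => rw [List.foldl_cons, List.foldl_cons, ih]; rfl

lemma pvFlat_keys (l : List (String × List (String × Int)))
    (st : PySem.Dict String Unit × PySem.Dict (String × String) Int) :
    ((l.foldl pvG_entry st).2).keys = PySem.Set.update st.2.keys (l.flatMap pvEntryPairs) := by
  induction l generalizing st with
  | nil => simp [PySem.Set.update]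
  | cons p l ih =>
    rw [List.foldl_cons, ih, List.flatMap_cons, PySem.Set.update_append]
    refine congrArg (fun k => PySem.Set.update k (l.flatMap pvEntryPairs)) ?_
    show ((p.2.foldl (pvG_pair p.1) (st.1.setdefault p.1 (), st.2)).2).keys = _
    rw [pvG_snd_pairs p.1 p.2 (st.1.setdefault p.1 (), st.2)]
    have := PySem.Dict.keys_foldl_insert_key p.2 (fun q => (p.1, q.1))
      (fun flat q => flat.getD (p.1, q.1) 0 + q.2) st.2
    rw [this]
    rfl

-- membership in the per-start projection of the pair list
lemma pvMem_proj (s e : String) (P : List (String × String)) :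
    e ∈ (P.filter (fun k => k.1 == s)).map (·.2) ↔ (s, e) ∈ P := by
  simp only [List.mem_map, List.mem_filter, beq_iff_eq]
  constructor
  · rintro ⟨k, ⟨hk, hk1⟩, hk2⟩
    exact (Prod.ext hk1 hk2 : k = (s, e)) ▸ hk
  · intro h
    exact ⟨(s, e), ⟨h, rfl⟩, rfl⟩

-- ordered dedup commutes with selecting one start's ends
lemma pvDedup_proj (s : String) (P : List (String × String)) :
    ((PySem.Set.ofList P).filter (fun k => k.1 == s)).map (·.2)
      = PySem.Set.ofList ((P.filter (fun k => k.1 == s)).map (·.2)) := by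
  induction P using List.reverseRecOn with
  | nil => rfl
  | append_singleton xs k ih =>
    rw [List.filter_append, List.map_append, PySem.Set.ofList_append_singleton]
    by_cases hks : (k.1 == s) = true
    · have hk1 : k.1 = s := by simpa using hks
      have hsingle : ((([k] : List (String × String)).filter (fun k => k.1 == s)).map (·.2)) = [k.2] := by
        simp [List.filter, hks]
      rw [hsingle, PySem.Set.ofList_append_singleton, ← ih]
      have hkeq : (s, k.2) = k := Prod.ext hk1.symm rfl
      by_cases hm : k ∈ PySem.Set.ofList xs
      · rw [PySem.Set.add_of_mem hm]
        have hk2 : k.2 ∈ ((PySem.Set.ofList xs).filter (fun k => k.1 == s)).map (·.2) :=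
          (pvMem_proj s k.2 (PySem.Set.ofList xs)).mpr (hkeq ▸ hm)
        rw [PySem.Set.add_of_mem hk2]
      · have hk2 : k.2 ∉ ((PySem.Set.ofList xs).filter (fun k => k.1 == s)).map (·.2) := by
          intro hmem
          exact hm (hkeq ▸ (pvMem_proj s k.2 (PySem.Set.ofList xs)).mp hmem)
        rw [PySem.Set.add_of_not_mem hm, PySem.Set.add_of_not_mem hk2,
          List.filter_append, List.map_append, hsingle]
    · have hks' : (k.1 == s) = false := by
        cases hx : (k.1 == s) with
        | false => rfl
        | true => exact absurd hx hks
      have hsingle : ((([k] : List (String × String)).filter (fun k => k.1 == s)).map (·.2)) = [] := by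
        simp [List.filter, hks']
      rw [hsingle, List.append_nil, ← ih]
      by_cases hm : k ∈ PySem.Set.ofList xs
      · rw [PySem.Set.add_of_mem hm]
      · rw [PySem.Set.add_of_not_mem hm, List.filter_append, List.map_append, hsingle,
          List.append_nil]

-- projecting the inner dict's keys out of the flat key list
lemma pvInner_keys_proj (s : String) (items : List ((String × String) × Int)) :
    (pvInnerOf s items).keys
      = ((items.map (·.1)).filter (fun k => k.1 == s)).map (·.2) := by
  simp only [pvInnerOf, PySem.Dict.keys]
  rw [List.filter_map, List.map_map, List.map_map]
  rfl

-- the flattened key lists of one start's dicts = that start's pairs projected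
lemma pvLs_eq (s : String) (l : List (String × List (String × Int))) :
    (((l.filter (fun p => p.1 == s)).map (·.2)).map (fun d => d.map Prod.fst)).flatten
      = ((l.flatMap pvEntryPairs).filter (fun k => k.1 == s)).map (·.2) := by
  induction l with
  | nil => rfl
  | cons p l ih =>
    rw [List.flatMap_cons, List.filter_append, List.map_append, List.filter_cons]
    by_cases hp : p.1 = s
    · have hp' : (p.1 == s) = true := by simp [hp]
      simp only [hp', reduceIte, List.map_cons, List.flatten_cons, ih]
      refine congrArg (fun x => x ++ _) ?_
      have hfull : (pvEntryPairs p).filter (fun k => k.1 == s) = pvEntryPairs p := by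
        rw [List.filter_eq_self]
        intro k hk
        simp only [pvEntryPairs] at hk
        obtain ⟨q, _, hq⟩ := List.mem_map.mp hk
        rw [← hq]
        simpa using hp
      rw [hfull, pvEntryPairs, List.map_map]
      rfl
    · have hp' : (p.1 == s) = false := by simpa using hp
      have hnil : (pvEntryPairs p).filter (fun k => k.1 == s) = [] := by
        rw [List.filter_eq_nil_iff]
        intro k hk
        simp only [pvEntryPairs] at hk
        obtain ⟨q, _, hq⟩ := List.mem_map.mp hk
        rw [← hq]
        simpa using hp
      simp only [hp', Bool.false_eq_true, reduceIte, hnil, List.map_nil, List.nil_append, ih]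

-- fold over terms = fold over the flattened entry list
lemma pvFoldl_terms_flatten {α : Type} (g : α → (String × List (String × Int)) → α)
    (tm : List (List (String × List (String × Int)))) (init : α) :
    tm.foldl (fun m t => t.foldl g m) init = tm.flatten.foldl g init := by
  induction tm generalizing init with
  | nil => rfl
  | cons t tm ih => rw [List.foldl_cons, List.flatten_cons, List.foldl_append, ih]

lemma pvMain (transmat : List (String × List (String × List (String × Int))))
    (hpre : Pre_merge10Terms transmat) :
    merge10Terms transmat = merge10Terms_alt transmat := by
  have hin : ∀ p ∈ ((transmat.map (·.2)).flatten), (p.2.map Prod.fst).Nodup := by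
    intro p hp
    obtain ⟨t, ht, hpt⟩ := List.mem_flatten.mp hp
    obtain ⟨y, hy, hye⟩ := List.mem_map.mp ht
    exact hpre y hy p (hye ▸ hpt)
  have hAfold : transmat.foldl (fun m t => t.2.foldl pvA_entry m) PySem.Dict.empty
      = ((transmat.map (·.2)).flatten).foldl pvA_entry PySem.Dict.empty := by
    rw [← pvFoldl_terms_flatten pvA_entry (transmat.map (·.2)) PySem.Dict.empty,
      List.foldl_map]
  have hBfold : transmat.foldl (fun g t => t.2.foldl pvB_group g) PySem.Dict.empty
      = ((transmat.map (·.2)).flatten).foldl pvB_group PySem.Dict.empty := by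
    rw [← pvFoldl_terms_flatten pvB_group (transmat.map (·.2)) PySem.Dict.empty,
      List.foldl_map]
  have hinv := pvInv_entries ((transmat.map (·.2)).flatten) PySem.Dict.empty
    (PySem.Dict.empty, PySem.Dict.empty) pvInv_init
  obtain ⟨h1, h0, h2, h3, h4⟩ := hinv
  have hgkeys : (((transmat.map (·.2)).flatten).foldl pvB_group PySem.Dict.empty).keys
      = (((transmat.map (·.2)).flatten).foldl pvG_entry (PySem.Dict.empty, PySem.Dict.empty)).1.keys := by
    rw [pvG_fold_fst ((transmat.map (·.2)).flatten) (PySem.Dict.empty, PySem.Dict.empty)]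
    exact pvGroup_keys _ _ _ rfl
  have hflatkeys : (((transmat.map (·.2)).flatten).foldl pvG_entry (PySem.Dict.empty, PySem.Dict.empty)).2.keys
      = PySem.Set.ofList (((transmat.map (·.2)).flatten).flatMap pvEntryPairs) := by
    rw [pvFlat_keys]
    rfl
  simp only [merge10Terms, merge10Terms_alt]
  rw [hAfold, hBfold]
  have hmnd : (((transmat.map (·.2)).flatten).foldl pvA_entry PySem.Dict.empty).keys.Nodup := by
    rw [h1]; exact h0
  have hgnd : (((transmat.map (·.2)).flatten).foldl pvB_group PySem.Dict.empty).keys.Nodup := by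
    rw [hgkeys]; exact h0
  rw [PySem.Dict.items_eq_map_keys _ hmnd PySem.Dict.empty,
      PySem.Dict.items_eq_map_keys _ hgnd [],
      h1, hgkeys, List.map_map, List.map_map]
  apply List.map_congr_left
  intro k hk
  have hkc : (((transmat.map (·.2)).flatten).foldl pvG_entry (PySem.Dict.empty, PySem.Dict.empty)).1.contains k = true :=
    (PySem.Dict.contains_iff_mem_keys _ k).mpr hk
  have hgm : (((transmat.map (·.2)).flatten).foldl pvA_entry PySem.Dict.empty).getD k PySem.Dict.empty
      = pvInnerOf k (((transmat.map (·.2)).flatten).foldl pvG_entry (PySem.Dict.empty, PySem.Dict.empty)).2.items := by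
    refine PySem.Dict.getD_of_get?_eq_some _ _ ?_
    rw [h4 k, if_pos hkc]
  have hds : (((transmat.map (·.2)).flatten).foldl pvB_group PySem.Dict.empty).getD k []
      = (((transmat.map (·.2)).flatten).filter (fun p => p.1 == k)).map (·.2) := by
    rw [pvGroup_getD]
    simp
  simp only [Function.comp]
  rw [hgm, hds]
  refine congrArg (fun x => (k, x)) ?_
  have hkeys2 : (pvInnerOf k (((transmat.map (·.2)).flatten).foldl pvG_entry (PySem.Dict.empty, PySem.Dict.empty)).2.items).keys
      = PySem.List.dedup (((((transmat.map (·.2)).flatten).filter (fun p => p.1 == k)).map (·.2)).map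
          (fun d => d.map Prod.fst)).flatten := by
    rw [pvLs_eq]
    simp only [PySem.List.dedup_eq_ofList]
    rw [← pvDedup_proj, pvInner_keys_proj]
    have hkf : (((transmat.map (·.2)).flatten).foldl pvG_entry (PySem.Dict.empty, PySem.Dict.empty)).2.items.map (·.1)
        = (((transmat.map (·.2)).flatten).foldl pvG_entry (PySem.Dict.empty, PySem.Dict.empty)).2.keys := rfl
    rw [hkf, hflatkeys]
  have h2' : ((((transmat.map (·.2)).flatten).foldl pvG_entry (PySem.Dict.empty, PySem.Dict.empty)).2.items.map (·.1)).Nodup := h2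
  rw [PySem.Dict.items_eq_map_keys
      (pvInnerOf k (((transmat.map (·.2)).flatten).foldl pvG_entry (PySem.Dict.empty, PySem.Dict.empty)).2.items)
      (pvInner_keys_nodup k
        (((transmat.map (·.2)).flatten).foldl pvG_entry (PySem.Dict.empty, PySem.Dict.empty)).2.items h2') 0, hkeys2]
  apply List.map_congr_left
  intro e _
  refine congrArg (fun x => (e, x)) ?_
  rw [pvInner_getD_flat k e _ h2]
  exact (pvCell_eq_flat ((transmat.map (·.2)).flatten) k e hin).symm

-- ===== VERDICT (by name: the statement is the Claim_ definition above) =====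
theorem merge10Terms_spec : Claim_equal_merge10Terms := by
  intro transmat _ hpre
  exact pvMain transmat hpre
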